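-- pv_equiv track=rewrite | github.com/rafailagln/BibSearchEngine | src/back/distributed/node.py | split_ids
-- ===== SOURCE A (Python) =====
-- def split_ids(ids, n):
--     """
--     Split the list of IDs into multiple shards.
--
--     Args:
--         ids (list): The list of IDs to be split.
--         n (int): The number of shards.
--
--     Returns:
--         dict: A dictionary with shard IDs as keys and a list of IDs as values.
--     """
--     result = {i: [] for i in range(1, n + 1)}
--     for i, _id in enumerate(ids):
--         if _id % n == 0:
--             result[n].append(_id)
--         else:
--             result[_id % n].append(_id)
--     return result
-- ===== SOURCE B (Python) =====
-- def split_ids(ids, n):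
--     """Bucket-major re-implementation: one filter pass per shard (key (x-1)%n+1 == i)."""
--     return {i: [x for x in ids if (x - 1) % n + 1 == i] for i in range(1, n + 1)}
-- ===== Notes on version B (the rewrite author's own statement) =====
-- stated objective: simpler
-- what changed: B replaces A's element-major scatter (enumerate ids, append into a mutable dict bucket picked by an if on _id % n) by a bucket-major one-liner: a dict comprehension that builds each shard i directly as the filter of ids by the single key formula (x-1) % n + 1 == i.
import Mathlib
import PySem

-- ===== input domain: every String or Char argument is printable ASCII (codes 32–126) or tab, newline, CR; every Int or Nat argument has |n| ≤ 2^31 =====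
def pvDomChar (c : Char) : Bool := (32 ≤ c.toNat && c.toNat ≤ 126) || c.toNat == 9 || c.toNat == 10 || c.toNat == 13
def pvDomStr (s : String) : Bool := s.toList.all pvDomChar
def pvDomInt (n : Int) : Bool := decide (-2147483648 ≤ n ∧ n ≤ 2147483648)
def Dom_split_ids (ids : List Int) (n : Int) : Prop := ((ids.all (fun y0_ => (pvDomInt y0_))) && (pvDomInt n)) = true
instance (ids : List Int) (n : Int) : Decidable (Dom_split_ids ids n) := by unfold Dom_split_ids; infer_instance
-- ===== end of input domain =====

-- B replaces A's element-major scatter into dict buckets by a bucket-major dict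
-- comprehension filtering ids with the single key formula (x-1) % n + 1 (objective: simpler).

-- ===== PORT A =====
-- result = {i: [] for i in range(1, n+1)}; for i, _id in enumerate(ids): append _id to
-- bucket n if _id % n == 0 else bucket _id % n; return result (as its items list).
def split_ids (ids : List Int) (n : Int) : List (Int × List Int) :=
  let result : PySem.Dict Int (List Int) :=
    (PySem.List.pyRange 1 (n + 1) 1).foldl
      (fun d i => d.insert i ([] : List Int)) PySem.Dict.empty
  let result :=
    (PySem.List.enumerate ids).foldl
      (fun d p =>
        if PySem.Int.mod p.2 n = 0 then d.modify n [] (· ++ [p.2])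
        else d.modify (PySem.Int.mod p.2 n) [] (· ++ [p.2]))
      result
  result.items

-- ===== PORT B =====
-- {i: [x for x in ids if (x - 1) % n + 1 == i] for i in range(1, n + 1)}
def split_ids_alt (ids : List Int) (n : Int) : List (Int × List Int) :=
  (PySem.List.pyRange 1 (n + 1) 1).map
    (fun i => (i, ids.filter (fun x => PySem.Int.mod (x - 1) n + 1 == i)))

-- ===== PRECONDITION & SPEC =====
-- Pre_ excludes exactly the inputs where A raises: n ≤ 0 with non-empty ids
-- (ZeroDivisionError for n = 0, KeyError for n < 0).
def Pre_split_ids (ids : List Int) (n : Int) : Prop := 1 ≤ n ∨ ids = []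
instance (ids : List Int) (n : Int) : Decidable (Pre_split_ids ids n) := by
  unfold Pre_split_ids; infer_instance

def pvWitness_split_ids : List Int × Int := ([1, 2, 3, 4, 5, -7, 0], 3)

def Spec_split_ids (ids : List Int) (n : Int) (out : List (Int × List Int)) : Prop :=
  out = split_ids_alt ids n
instance (ids : List Int) (n : Int) (out : List (Int × List Int)) :
    Decidable (Spec_split_ids ids n out) := by unfold Spec_split_ids; infer_instance

-- ===== CLAIM (what is proved, stated in full; the proofs are below) =====
def Claim_equal_split_ids : Prop :=
  ∀ (ids : List Int) (n : Int), Dom_split_ids ids n → Pre_split_ids ids n →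
    Spec_split_ids ids n (split_ids ids n)
-- ===== LEMMAS AND PROOFS =====

-- A's branch key equals B's key formula when 0 < n.
lemma keyA_eq_keyB (x n : Int) (hn : 0 < n) :
    (if PySem.Int.mod x n = 0 then n else PySem.Int.mod x n) =
      PySem.Int.mod (x - 1) n + 1 := by
  simp only [PySem.Int.mod_eq_emod_of_pos hn]
  have h1 : (x - 1) % n = (x % n - 1) % n := by
    conv_lhs => rw [show x - 1 = (x % n - 1) + n * (x / n) by rw [Int.emod_def]; ring]
    simp [Int.add_mul_emod_self_left]
  have hlt : x % n < n := Int.emod_lt_of_pos _ hn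
  have hge : 0 ≤ x % n := Int.emod_nonneg _ (by omega)
  by_cases h : x % n = 0
  · simp only [h, if_true]
    rw [h1, h]
    have : (-1 : Int) % n = n - 1 := by
      rw [show (-1 : Int) = (n - 1) + n * (-1) by ring, Int.add_mul_emod_self_left,
        Int.emod_eq_of_lt (by omega) (by omega)]
    rw [show (0 : Int) - 1 = -1 by ring, this]; ring
  · simp only [h, if_false]
    rw [h1, Int.emod_eq_of_lt (a := x % n - 1) (by omega) (by omega)]
    ring

-- A's scatter loop over enumerate(ids) equals a modify-by-key loop over (key x, x) pairs.
lemma loopA_eq (n : Int) (hpos : 0 < n) (ids : List Int) (s : Int)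
    (d : PySem.Dict Int (List Int)) :
    (PySem.List.enumerate ids s).foldl
      (fun d p =>
        if PySem.Int.mod p.2 n = 0 then d.modify n [] (· ++ [p.2])
        else d.modify (PySem.Int.mod p.2 n) [] (· ++ [p.2])) d =
    (ids.map (fun x => (PySem.Int.mod (x - 1) n + 1, x))).foldl
      (fun d p => d.modify p.1 [] (· ++ [p.2])) d := by
  induction ids generalizing s d with
  | nil => rfl
  | cons x xs ih =>
    simp only [PySem.List.enumerate_cons, List.foldl_cons, List.map_cons]
    rw [← ih (s + 1)]
    congr 1
    rw [show PySem.Int.mod (x - 1) n + 1 =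
          (if PySem.Int.mod x n = 0 then n else PySem.Int.mod x n) from
        (keyA_eq_keyB x n hpos).symm]
    split <;> rfl

theorem split_ids_spec : Claim_equal_split_ids := by
  intro ids n _ hpre
  unfold Spec_split_ids split_ids split_ids_alt
  dsimp only
  -- initial dict: items = keys 1..n paired with []
  have hinit :
      ((PySem.List.pyRange 1 (n + 1) 1).foldl
          (fun d i => d.insert i ([] : List Int)) PySem.Dict.empty).items =
        (PySem.List.pyRange 1 (n + 1) 1).map (fun i => (i, ([] : List Int))) := by
    have := PySem.Dict.items_foldl_insert_fresh (l := PySem.List.pyRange 1 (n + 1) 1)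
      (k := fun i => i) (v := fun _ => ([] : List Int)) (d := PySem.Dict.empty)
      (by intro a _; simp [PySem.Dict.contains_empty])
      (by simpa using PySem.List.nodup_pyRange_one 1 (n + 1))
    simpa [PySem.Dict.items] using this
  rcases hpre with hn | hnil
  · -- main case: 1 ≤ n
    set d0 : PySem.Dict Int (List Int) :=
      (PySem.List.pyRange 1 (n + 1) 1).foldl
        (fun d i => d.insert i ([] : List Int)) PySem.Dict.empty with hd0
    have hpos : (0 : Int) < n := by omega
    rw [loopA_eq n hpos]
    set l := ids.map (fun x => (PySem.Int.mod (x - 1) n + 1, x)) with hl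
    set dfin := l.foldl (fun d p => d.modify p.1 [] (· ++ [p.2])) d0 with hdfin
    -- keys of d0
    have hkeys0 : d0.keys = PySem.List.pyRange 1 (n + 1) 1 := by
      unfold PySem.Dict.keys
      rw [hinit]; simp [Function.comp_def]
    -- every key of l is already a key of d0
    have hmemkey : ∀ p ∈ l, p.1 ∈ d0.keys := by
      intro p hp
      rw [hl] at hp
      obtain ⟨x, _, rfl⟩ := List.mem_map.mp hp
      rw [hkeys0, PySem.List.mem_pyRange_one]
      have h1 := PySem.Int.mod_nonneg (x - 1) hpos
      have h2 := PySem.Int.mod_lt (x - 1) hpos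
      constructor <;> omega
    -- keys unchanged by the modify loop
    have hkeysfin : dfin.keys = d0.keys := by
      rw [hdfin, PySem.Dict.keys_foldl_modify_key l Prod.fst ([] : List Int)
        (fun _ p => (· ++ [p.2])) d0]
      rw [PySem.Set.update_eq_append_filter]
      have : (PySem.Set.ofList (l.map (·.1))).filter
          (fun y => !(PySem.Set.contains d0.keys y)) = [] := by
        apply List.filter_eq_nil_iff.mpr
        intro y hy
        have hy' : y ∈ l.map (·.1) := (PySem.Set.mem_ofList _ _).mp hy
        obtain ⟨p, hp, rfl⟩ := List.mem_map.mp hy'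
        simp [PySem.Set.contains, hmemkey p hp]
      rw [this, List.append_nil]
    have hnodup0 : d0.keys.Nodup := by
      rw [hkeys0]; exact PySem.List.nodup_pyRange_one 1 (n + 1)
    have hnodupfin : dfin.keys.Nodup := by rw [hkeysfin]; exact hnodup0
    -- value at each key
    have hval : ∀ k, dfin.getD k [] = d0.getD k [] ++ (l.filter (fun p => p.1 == k)).map (·.2) :=
      fun k => by rw [hdfin]; exact PySem.Dict.getD_foldl_modify_append l d0 k
    have hd0getD : ∀ k ∈ d0.keys, d0.getD k ([] : List Int) = [] := by
      intro k hk
      rw [hkeys0] at hk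
      have : (k, ([] : List Int)) ∈ d0.items := by
        rw [hinit]; exact List.mem_map.mpr ⟨k, hk, rfl⟩
      exact PySem.Dict.getD_of_mem_items d0 this hnodup0 []
    -- items of final dict as map over keys
    rw [PySem.Dict.items_eq_map_keys dfin hnodupfin ([] : List Int), hkeysfin, hkeys0]
    apply List.map_congr_left
    intro i hi
    rw [hval i, hd0getD i (by rw [hkeys0]; exact hi), List.nil_append]
    congr 1
    rw [hl]
    simp [List.filter_map, List.map_map, Function.comp_def]
  · -- ids = [] : both sides are the map of empty buckets
    subst hnil
    simp only [PySem.List.enumerate_nil, List.foldl_nil]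
    rw [hinit]
    rfl
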